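-- pv_equiv track=rewrite | github.com/yaniv-golan/evolia | src/evolia/security/file_access.py | _split_with_escaped_spaces
-- ===== SOURCE A (Python) =====
-- from typing import IO, Any, Dict, List, Optional, Union
--
-- def _split_with_escaped_spaces(text: str) -> List[str]:
--     """Split text into tokens, preserving escaped spaces.
--
--     Args:
--         text: Text to split
--
--     Returns:
--         List of tokens
--     """
--     tokens = []
--     current_token = []
--     escaped = False
--
--     for char in text:
--         if escaped:
--             current_token.append(char)
--             escaped = False
--         elif char == "\\":
--             escaped = True
--         elif char.isspace() and not escaped:
--             if current_token:
--                 tokens.append("".join(current_token))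
--                 current_token = []
--         else:
--             current_token.append(char)
--
--     if current_token:
--         tokens.append("".join(current_token))
--
--     return tokens
-- ===== SOURCE B (Python) =====
-- def _split_with_escaped_spaces(text):
--     """Split text into tokens, preserving escaped spaces.
--
--     Staged re-implementation: (1) split the text on backslashes with
--     str.split, (2) rebuild a flat list of (char, is_literal) pairs -- the
--     first character after each backslash is literal, an empty piece between
--     two backslashes stands for an escaped backslash, a dangling final
--     backslash contributes nothing, (3) group the pairs into tokens,
--     splitting only on non-literal whitespace.
--     """
--     first, *rest = text.split("\\")
--     marked = [(c, False) for c in first]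
--     it = iter(rest)
--     for part in it:
--         if part:
--             marked.append((part[0], True))
--             marked.extend((c, False) for c in part[1:])
--         else:
--             nxt = next(it, None)
--             if nxt is None:
--                 break  # dangling backslash: dropped
--             marked.append(("\\", True))
--             marked.extend((c, False) for c in nxt)
--     tokens = []
--     cur = []
--     for c, lit in marked:
--         if not lit and c.isspace():
--             if cur:
--                 tokens.append("".join(cur))
--                 cur = []
--         else:
--             cur.append(c)
--     if cur:
--         tokens.append("".join(cur))
--     return tokens
-- ===== Notes on version B (the rewrite author's own statement) =====
-- stated objective: alternative
-- what changed: Replaces A's single char-by-char scan carrying an escape flag by a staged pipeline: split the text on backslashes with str.split, rebuild a flat list of (char, is_literal) pairs from the pieces, then group the pairs into tokens splitting only on non-literal whitespace.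
import Mathlib
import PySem

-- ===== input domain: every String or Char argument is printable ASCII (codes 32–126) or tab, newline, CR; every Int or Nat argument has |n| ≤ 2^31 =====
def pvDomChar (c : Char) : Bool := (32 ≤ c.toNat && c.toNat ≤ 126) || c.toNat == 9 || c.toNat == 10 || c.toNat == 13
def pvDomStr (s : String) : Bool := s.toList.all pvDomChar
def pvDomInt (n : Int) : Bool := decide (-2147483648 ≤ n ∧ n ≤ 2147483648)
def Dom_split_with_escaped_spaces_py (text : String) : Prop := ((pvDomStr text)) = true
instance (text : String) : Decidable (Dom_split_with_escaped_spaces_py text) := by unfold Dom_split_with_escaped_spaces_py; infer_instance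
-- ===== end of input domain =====

-- B replaces A's single scan with an escape flag by a staged pipeline — split on
-- backslashes, mark literal characters, group into tokens (objective: alternative).

-- ===== PORT A =====
-- state: tokens, current_token, escaped — one step per character, as in A
def pvALoop : List Char → List String → List Char → Bool → List String
  | [], toks, cur, _ => if cur.isEmpty then toks else toks ++ [String.ofList cur]
  | c :: rest, toks, cur, esc =>
    if esc then pvALoop rest toks (cur ++ [c]) false
    else if c = '\\' then pvALoop rest toks cur true
    else if PySem.Chars.isspace c then
      if cur.isEmpty then pvALoop rest toks cur esc
      else pvALoop rest (toks ++ [String.ofList cur]) [] esc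
    else pvALoop rest toks (cur ++ [c]) esc

def split_with_escaped_spaces_py (text : String) : List String :=
  pvALoop text.toList [] [] false

-- ===== PORT B =====
-- stage 2 (the loop over `rest`): an empty piece between two backslashes is an
-- escaped backslash; a dangling final backslash ([] with nothing after) is dropped
def pvMarkRest : List (List Char) → List (Char × Bool)
  | [] => []
  | [] :: rest =>
    match rest with
    | [] => []
    | p :: ps => ('\\', true) :: (p.map (fun c => (c, false)) ++ pvMarkRest ps)
  | (d :: ds) :: rest => (d, true) :: (ds.map (fun c => (c, false)) ++ pvMarkRest rest)

-- stage 2 entry: chars of the first piece are all non-literal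
def pvMarked : List (List Char) → List (Char × Bool)
  | [] => []
  | first :: rest => first.map (fun c => (c, false)) ++ pvMarkRest rest

-- stage 3: group the marked characters into tokens (split on non-literal whitespace)
def pvGroup : List (Char × Bool) → List String → List Char → List String
  | [], toks, cur => if cur.isEmpty then toks else toks ++ [String.ofList cur]
  | (c, lit) :: rest, toks, cur =>
    if !lit && PySem.Chars.isspace c then
      if cur.isEmpty then pvGroup rest toks cur
      else pvGroup rest (toks ++ [String.ofList cur]) []
    else pvGroup rest toks (cur ++ [c])

-- stage 1: text.split("\\") on a one-character separator is List.splitOn '\\'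
def split_with_escaped_spaces_py_alt (text : String) : List String :=
  pvGroup (pvMarked (text.toList.splitOn '\\')) [] []

-- ===== PRECONDITION & SPEC =====
def Spec_split_with_escaped_spaces_py (text : String) (out : List String) : Prop := out = split_with_escaped_spaces_py_alt text
instance (text : String) (out : List String) : Decidable (Spec_split_with_escaped_spaces_py text out) := by unfold Spec_split_with_escaped_spaces_py; infer_instance

-- ===== CLAIM (what is proved, stated in full; the proofs are below) =====
def Claim_equal_split_with_escaped_spaces_py : Prop := ∀ (text : String), Dom_split_with_escaped_spaces_py text → Spec_split_with_escaped_spaces_py text (split_with_escaped_spaces_py text)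

-- ===== LEMMAS AND PROOFS =====

-- proof-side helper: the marked-character stream A's flag machine effectively reads
def pvDecode : List Char → Bool → List (Char × Bool)
  | [], _ => []
  | c :: r, true => (c, true) :: pvDecode r false
  | c :: r, false => if c = '\\' then pvDecode r true else (c, false) :: pvDecode r false

-- A's loop is stage 3 run over the decoded stream
theorem pvALoop_eq_group : ∀ (cs : List Char) (esc : Bool) (toks : List String) (cur : List Char),
    pvALoop cs toks cur esc = pvGroup (pvDecode cs esc) toks cur := by
  intro cs
  induction cs with
  | nil => intro esc toks cur; cases esc <;> rfl
  | cons c rest ih =>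
    intro esc toks cur
    cases esc with
    | true =>
      rw [pvALoop, pvDecode, pvGroup]
      simp [ih]
    | false =>
      by_cases hb : c = '\\'
      · subst hb; rw [pvALoop, pvDecode]; simp [ih]
      · by_cases hs : PySem.Chars.isspace c = true
        all_goals rw [pvALoop, pvDecode]
        all_goals simp [hb, hs, pvGroup, ih]

-- the decoded stream IS what B's stages 1–2 produce
theorem pvDecode_eq_marked (n : Nat) : ∀ (cs : List Char), cs.length ≤ n →
    pvDecode cs false = pvMarked (cs.splitOnP (· == '\\')) ∧
    pvDecode cs true = pvMarkRest (cs.splitOnP (· == '\\')) := by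
  induction n with
  | zero =>
    intro cs h
    have : cs = [] := List.length_eq_zero_iff.mp (Nat.le_zero.mp h)
    subst this; exact ⟨rfl, rfl⟩
  | succ n ih =>
    intro cs h
    cases cs with
    | nil => exact ⟨rfl, rfl⟩
    | cons c rest =>
      have h' : rest.length ≤ n := by simp at h; omega
      obtain ⟨ih1, ih2⟩ := ih rest h'
      obtain ⟨p, ps, hps⟩ :=
        List.exists_cons_of_ne_nil (List.splitOnP_ne_nil (· == '\\') rest)
      by_cases hb : c = '\\'
      · subst hb
        have hsplit : ('\\' :: rest).splitOnP (· == '\\') = [] :: rest.splitOnP (· == '\\') := by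
          simp [List.splitOnP_cons]
        refine ⟨?_, ?_⟩
        · rw [pvDecode, if_pos rfl, hsplit]
          simpa [pvMarked] using ih2
        · rw [pvDecode, hsplit, hps]
          rw [hps, pvMarked] at ih1
          simp [pvMarkRest, ih1]
      · have hsplit : (c :: rest).splitOnP (· == '\\') = (c :: p) :: ps := by
          simp [List.splitOnP_cons, hb, hps]
        rw [hps, pvMarked] at ih1
        refine ⟨?_, ?_⟩
        · rw [pvDecode, if_neg hb, hsplit]
          simp [pvMarked, ih1]
        · rw [pvDecode, hsplit]
          simp [pvMarkRest, ih1]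

-- ===== VERDICT (by name: the statement is the Claim_ definition above) =====
theorem split_with_escaped_spaces_py_spec : Claim_equal_split_with_escaped_spaces_py := by
  intro text _
  unfold Spec_split_with_escaped_spaces_py split_with_escaped_spaces_py split_with_escaped_spaces_py_alt
  rw [pvALoop_eq_group,
    show text.toList.splitOn '\\' = text.toList.splitOnP (· == '\\') from rfl,
    (pvDecode_eq_marked text.toList.length text.toList le_rfl).1]
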